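-- pv_equiv track=rewrite | github.com/ssweilee/AITravelAppIBM | python-recommender/scripts/build_training_dataset.py | _infer_headers
-- ===== SOURCE A (Python) =====
-- from typing import Dict, Tuple, List, Any, Set
--
-- def _infer_headers(headers: List[str]) -> Tuple[str, str, str|None]:
--     """Guess user, trip, and label columns from a CSV header."""
--     lower = [h.strip().lower() for h in headers]
--     user_col = None
--     trip_col = None
--     label_col = None
--     for h in lower:
--         if user_col is None and h in ('user', 'userid', 'user_id', 'uid'):
--             user_col = headers[lower.index(h)]
--         if trip_col is None and h in ('trip', 'tripid', 'trip_id', 'tid', 'item', 'itemid', 'item_id'):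
--             trip_col = headers[lower.index(h)]
--         if label_col is None and h in ('label', 'relevance', 'liked', 'y', 'target', 'value', 'isliked', 'is_liked'):
--             label_col = headers[lower.index(h)]
--     return user_col, trip_col, label_col
-- ===== SOURCE B (Python) =====
-- def _infer_headers(headers):
--     """Guess user, trip, and label columns from a CSV header."""
--     def first_match(cands):
--         for h in headers:
--             if h.strip().lower() in cands:
--                 return h
--         return None
--     return (first_match({'user', 'userid', 'user_id', 'uid'}),
--             first_match({'trip', 'tripid', 'trip_id', 'tid', 'item', 'itemid', 'item_id'}),
--             first_match({'label', 'relevance', 'liked', 'y', 'target', 'value', 'isliked', 'is_liked'}))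
-- ===== Notes on version B (the rewrite author's own statement) =====
-- stated objective: simpler
-- what changed: Replaces the fused stateful loop with is-None guards and the lower.index(h) rescan by a small helper doing one clean first-match scan per candidate set, called three times.
import Mathlib
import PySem

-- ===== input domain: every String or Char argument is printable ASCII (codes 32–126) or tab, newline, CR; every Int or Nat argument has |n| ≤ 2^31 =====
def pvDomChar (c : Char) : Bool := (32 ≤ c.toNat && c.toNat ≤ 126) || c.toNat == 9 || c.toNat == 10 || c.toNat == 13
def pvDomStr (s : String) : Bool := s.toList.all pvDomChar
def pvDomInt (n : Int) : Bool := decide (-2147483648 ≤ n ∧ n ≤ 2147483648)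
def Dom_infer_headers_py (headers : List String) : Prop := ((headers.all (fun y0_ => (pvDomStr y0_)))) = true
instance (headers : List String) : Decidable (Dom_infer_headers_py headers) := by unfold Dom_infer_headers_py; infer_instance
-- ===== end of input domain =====

-- B replaces A's fused stateful loop (with its lower.index(h) rescan) by three independent
-- first-match scans, one per candidate set (objective: simpler).

-- shared constants: h.strip().lower() and the three candidate tuples
def pvLow (h : String) : String := PySem.Str.lower (PySem.Str.strip h)
def pvUserCands : List String := ["user", "userid", "user_id", "uid"]
def pvTripCands : List String := ["trip", "tripid", "trip_id", "tid", "item", "itemid", "item_id"]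
def pvLabelCands : List String := ["label", "relevance", "liked", "y", "target", "value", "isliked", "is_liked"]

-- ===== PORT A =====
-- headers[lower.index(h)]
def pvLook (headers lower : List String) (h : String) : Option String :=
  (PySem.List.index? lower h).bind fun i => PySem.List.pyGet? headers (i : Int)

-- one 'if xxx_col is None and h in (…): xxx_col = headers[lower.index(h)]' statement
def pvStep (headers lower cands : List String) (acc : Option String) (h : String) : Option String :=
  if acc = none ∧ cands.contains h then pvLook headers lower h else acc

def pvStepA (headers lower : List String)
    (st : Option String × Option String × Option String) (h : String) :
    Option String × Option String × Option String :=
  (pvStep headers lower pvUserCands st.1 h,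
   pvStep headers lower pvTripCands st.2.1 h,
   pvStep headers lower pvLabelCands st.2.2 h)

def infer_headers_py (headers : List String) : Option String × Option String × Option String :=
  let lower := headers.map pvLow
  lower.foldl (pvStepA headers lower) (none, none, none)

-- ===== PORT B =====
-- first original header whose stripped-lowered form is in the candidate set, scanning once
def pvFirstMatch (headers : List String) (cands : List String) : Option String :=
  headers.find? (fun h => cands.contains (pvLow h))

def infer_headers_py_alt (headers : List String) : Option String × Option String × Option String :=
  (pvFirstMatch headers pvUserCands,
   pvFirstMatch headers pvTripCands,
   pvFirstMatch headers pvLabelCands)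

-- ===== PRECONDITION & SPEC =====
def Spec_infer_headers_py (headers : List String) (out : Option String × Option String × Option String) : Prop := out = infer_headers_py_alt headers
instance (headers : List String) (out : Option String × Option String × Option String) : Decidable (Spec_infer_headers_py headers out) := by unfold Spec_infer_headers_py; infer_instance

-- ===== CLAIM (what is proved, stated in full; the proofs are below) =====
def Claim_equal_infer_headers_py : Prop := ∀ (headers : List String), Dom_infer_headers_py headers → Spec_infer_headers_py headers (infer_headers_py headers)

-- ===== LEMMAS AND PROOFS =====

-- once a column is found, the loop keeps it
theorem pv_fold_some (headers lower cands : List String) (x : String) :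
    ∀ l : List String, l.foldl (pvStep headers lower cands) (some x) = some x := by
  intro l
  induction l with
  | nil => rfl
  | cons h t ih => simpa [pvStep] using ih

-- the state-triple loop splits into three independent one-column loops
theorem pv_fold_triple (headers lower : List String) :
    ∀ (l : List String) (a b c : Option String),
      l.foldl (pvStepA headers lower) (a, b, c) =
        (l.foldl (pvStep headers lower pvUserCands) a,
         l.foldl (pvStep headers lower pvTripCands) b,
         l.foldl (pvStep headers lower pvLabelCands) c) := by
  intro l
  induction l with
  | nil => intro a b c; rfl
  | cons h t ih => intro a b c; simpa [pvStepA] using ih _ _ _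

-- core invariant: running the one-column loop over the suffix of the lowered list,
-- with a prefix containing no candidate, yields the first match in the remaining headers
theorem pv_fold_find (cands : List String) :
    ∀ (suf pre headers : List String),
      headers.map pvLow = pre ++ suf →
      (∀ x ∈ pre, cands.contains x = false) →
      suf.foldl (pvStep headers (pre ++ suf) cands) none
        = (headers.drop pre.length).find? (fun h => cands.contains (pvLow h)) := by
  intro suf
  induction suf with
  | nil =>
    intro pre headers hmap _
    have hlen : headers.length = pre.length := by
      have := congrArg List.length hmap; simpa using this
    simp [List.drop_eq_nil_of_le (le_of_eq hlen)]
  | cons h t ih =>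
    intro pre headers hmap hpre
    have hlen : pre.length < headers.length := by
      have := congrArg List.length hmap; simp at this; omega
    have hget : pvLow headers[pre.length] = h := by
      have := congrArg (fun l => l[pre.length]?) hmap
      simp [List.getElem?_eq_getElem hlen] at this
      exact this
    have hdrop : headers.drop pre.length = headers[pre.length] :: headers.drop (pre.length + 1) :=
      List.drop_eq_getElem_cons hlen
    by_cases hc : cands.contains h
    · -- found here: lower.index(h) = pre.length since h is not in pre
      have hcm : h ∈ cands := by simpa using hc
      have hnotpre : h ∉ pre := by
        intro hmem
        have hfalse := hpre h hmem
        rw [hfalse] at hc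
        exact absurd hc (by decide)
      have hidx : PySem.List.index? (pre ++ h :: t) h = some pre.length := by
        have h1 : PySem.List.index? ((pre ++ [h]) ++ t) h = PySem.List.index? (pre ++ [h]) h :=
          PySem.List.index?_append_of_mem t (by simp)
        have h2 : PySem.List.index? (pre ++ [h]) h = some pre.length :=
          PySem.List.index?_append_singleton_self pre h hnotpre
        simpa [List.append_assoc] using h1.trans h2
      have hlook : pvLook headers (pre ++ h :: t) h = some headers[pre.length] := by
        rw [pvLook, hidx]
        simp [PySem.List.pyGet?_natCast, List.getElem?_eq_getElem hlen]
      have hstep : pvStep headers (pre ++ h :: t) cands none h = some headers[pre.length] := by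
        rw [pvStep, if_pos ⟨rfl, hc⟩, hlook]
      rw [List.foldl_cons, hstep, pv_fold_some]
      simp only [hdrop, List.find?_cons, hget, hc]
    · -- not a candidate: extend the prefix
      have hcm : h ∉ cands := by simpa using hc
      have hcf : cands.contains h = false := by simp [hcm]
      have hstep : pvStep headers (pre ++ h :: t) cands none h = none := by
        rw [pvStep, if_neg (fun hx => hc hx.2)]
      have hmap' : headers.map pvLow = (pre ++ [h]) ++ t := by
        simpa [List.append_assoc] using hmap
      have hpre' : ∀ x ∈ pre ++ [h], cands.contains x = false := by
        intro x hx
        rcases List.mem_append.1 hx with hx | hx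
        · exact hpre x hx
        · simp at hx; subst hx; simpa using hc
      have hih := ih (pre ++ [h]) headers hmap' hpre'
      rw [List.foldl_cons, hstep]
      rw [show pre ++ h :: t = (pre ++ [h]) ++ t by simp [List.append_assoc]]
      rw [hih]
      simp only [hdrop, List.find?_cons, hget, hcf, List.length_append, List.length_cons,
        List.length_nil]

theorem pv_one_col (cands headers : List String) :
    (headers.map pvLow).foldl (pvStep headers (headers.map pvLow) cands) none
      = pvFirstMatch headers cands := by
  have := pv_fold_find cands (headers.map pvLow) [] headers (by simp) (by simp)
  simpa [pvFirstMatch] using this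

-- ===== VERDICT (by name: the statement is the Claim_ definition above) =====
theorem infer_headers_py_spec : Claim_equal_infer_headers_py := by
  intro headers _
  show infer_headers_py headers = infer_headers_py_alt headers
  simp only [infer_headers_py, infer_headers_py_alt, pv_fold_triple, pv_one_col]
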